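-- pv_equiv track=rewrite | github.com/pragyateju/test_automate_codes | tm_log_validator.py | extract_latest_tm_block
-- ===== SOURCE A (Python) =====
-- def extract_latest_tm_block(log_lines, tm_id):
--     blocks = []
--     current_block = []
--     capture = False
--
--     for line in log_lines:
--         if f"Received TM Id:- {tm_id}" in line:
--             if current_block:
--                 blocks.append(current_block)
--                 current_block = []
--             capture = True
--
--         if capture:
--             current_block.append(line.strip())
--
--     if current_block:
--         blocks.append(current_block)
--
--     return blocks[-1] if blocks else []
-- ===== SOURCE B (Python) =====
-- def extract_latest_tm_block(log_lines, tm_id):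
--     lines = list(log_lines)
--     marker = f"Received TM Id:- {tm_id}"
--     idx = None
--     for i, line in enumerate(lines):
--         if marker in line:
--             idx = i
--     if idx is None:
--         return []
--     return [line.strip() for line in lines[idx:]]
-- ===== Notes on version B (the rewrite author's own statement) =====
-- stated objective: faster
-- what changed: B makes one pass recording only the index of the last marker line and strips just the slice from there, instead of A's building and stripping of every marker-delimited block from the first marker on.
import Mathlib
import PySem

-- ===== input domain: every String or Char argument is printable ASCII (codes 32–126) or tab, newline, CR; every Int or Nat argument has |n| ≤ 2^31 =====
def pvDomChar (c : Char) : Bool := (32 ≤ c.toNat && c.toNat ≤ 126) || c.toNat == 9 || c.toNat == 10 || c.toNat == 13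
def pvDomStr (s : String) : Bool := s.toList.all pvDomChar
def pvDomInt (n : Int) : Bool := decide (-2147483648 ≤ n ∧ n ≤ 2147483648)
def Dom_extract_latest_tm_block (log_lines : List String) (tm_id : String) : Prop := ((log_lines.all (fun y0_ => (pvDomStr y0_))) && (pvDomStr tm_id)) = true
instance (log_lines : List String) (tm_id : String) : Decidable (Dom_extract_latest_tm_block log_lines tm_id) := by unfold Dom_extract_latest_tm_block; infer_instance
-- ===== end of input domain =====

-- B replaces A's accumulation of all marker-delimited blocks by one pass recording the
-- index of the LAST marker line and slicing the list there; only that suffix is stripped.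

-- ===== PORT A =====
-- loop body of A: state = (blocks, current_block, capture)
def pvStepA (marker : String) (st : List (List String) × List String × Bool)
    (line : String) : List (List String) × List String × Bool :=
  let (blocks, current_block, capture) := st
  let (blocks, current_block, capture) :=
    if PySem.Str.isIn marker line then
      if current_block ≠ [] then (blocks ++ [current_block], ([] : List String), true)
      else (blocks, current_block, true)
    else (blocks, current_block, capture)
  if capture then (blocks, current_block ++ [PySem.Str.strip line], capture)
  else (blocks, current_block, capture)

-- A's epilogue: flush current_block, then 'blocks[-1] if blocks else []'
def pvFinishA (st : List (List String) × List String × Bool) : List String :=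
  let (blocks, current_block, _) := st
  let blocks := if current_block ≠ [] then blocks ++ [current_block] else blocks
  match blocks.getLast? with
  | some b => b
  | none => []

def extract_latest_tm_block (log_lines : List String) (tm_id : String) : List String :=
  let marker := "Received TM Id:- " ++ tm_id
  pvFinishA (log_lines.foldl (pvStepA marker) ([], [], false))

-- ===== PORT B =====
-- B's forward pass: 'for i, line in enumerate(lines): if marker in line: idx = i'
def pvLastIdx (marker : String) (lines : List String) : Option Int :=
  (PySem.List.enumerate lines).foldl
    (fun acc p => if PySem.Str.isIn marker p.2 then some p.1 else acc) none

def extract_latest_tm_block_alt (log_lines : List String) (tm_id : String) : List String :=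
  let marker := "Received TM Id:- " ++ tm_id
  match pvLastIdx marker log_lines with
  | none => []
  | some i => (PySem.List.slice log_lines (some i) none).map PySem.Str.strip

-- ===== PRECONDITION & SPEC =====
def Spec_extract_latest_tm_block (log_lines : List String) (tm_id : String) (out : List String) : Prop := out = extract_latest_tm_block_alt log_lines tm_id
instance (log_lines : List String) (tm_id : String) (out : List String) : Decidable (Spec_extract_latest_tm_block log_lines tm_id out) := by unfold Spec_extract_latest_tm_block; infer_instance

-- ===== CLAIM (what is proved, stated in full; the proofs are below) =====
def Claim_equal_extract_latest_tm_block : Prop := ∀ (log_lines : List String) (tm_id : String), Dom_extract_latest_tm_block log_lines tm_id → Spec_extract_latest_tm_block log_lines tm_id (extract_latest_tm_block log_lines tm_id)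

-- ===== LEMMAS AND PROOFS =====

-- proof-side bridge: the suffix of `lines` starting at the last marker line, if any
def pvTailFrom (marker : String) : List String → Option (List String)
  | [] => none
  | l :: t =>
    match pvTailFrom marker t with
    | some s => some s
    | none => if PySem.Str.isIn marker l then some (l :: t) else none

-- once capture is on and current_block is nonempty, A's run computes the
-- stripped suffix from the last marker of the rest, or current_block ++ stripped rest
lemma pvCaptureRun (marker : String) (rest : List String) :
    ∀ (blocks : List (List String)) (cur : List String), cur ≠ [] →
    pvFinishA (rest.foldl (pvStepA marker) (blocks, cur, true)) =
      (match pvTailFrom marker rest with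
       | some s => s.map PySem.Str.strip
       | none => cur ++ rest.map PySem.Str.strip) := by
  induction rest with
  | nil =>
    intro blocks cur hcur
    simp [pvFinishA, pvTailFrom, hcur]
  | cons l t ih =>
    intro blocks cur hcur
    by_cases hm : PySem.Chars.isIn marker.toList l.toList
    · have h1 : pvStepA marker (blocks, cur, true) l
          = (blocks ++ [cur], [PySem.Str.strip l], true) := by
        simp [pvStepA, hm, hcur]
      rw [List.foldl_cons, h1, ih _ _ (by simp)]
      cases ht : pvTailFrom marker t with
      | some s => simp [pvTailFrom, ht]
      | none => simp [pvTailFrom, ht, hm]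
    · have h1 : pvStepA marker (blocks, cur, true) l
          = (blocks, cur ++ [PySem.Str.strip l], true) := by
        simp [pvStepA, hm]
      rw [List.foldl_cons, h1, ih _ _ (by simp)]
      cases ht : pvTailFrom marker t with
      | some s => simp [pvTailFrom, ht]
      | none => simp [pvTailFrom, ht, hm]

-- from the initial state A computes the stripped last-marker suffix (or [])
lemma pvStartRun (marker : String) (rest : List String) :
    pvFinishA (rest.foldl (pvStepA marker) ([], [], false)) =
      (match pvTailFrom marker rest with
       | some s => s.map PySem.Str.strip
       | none => []) := by
  induction rest with
  | nil => simp [pvFinishA, pvTailFrom]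
  | cons l t ih =>
    by_cases hm : PySem.Chars.isIn marker.toList l.toList
    · have h1 : pvStepA marker ([], [], false) l
          = ([], [PySem.Str.strip l], true) := by
        simp [pvStepA, hm]
      rw [List.foldl_cons, h1, pvCaptureRun marker t _ _ (by simp)]
      cases ht : pvTailFrom marker t with
      | some s => simp [pvTailFrom, ht]
      | none => simp [pvTailFrom, ht, hm]
    · have h1 : pvStepA marker ([], [], false) l = ([], [], false) := by
        simp [pvStepA, hm]
      rw [List.foldl_cons, h1, ih]
      cases ht : pvTailFrom marker t with
      | some s => simp [pvTailFrom, ht]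
      | none => simp [pvTailFrom, ht, hm]

-- the suffix returned by pvTailFrom really is a tail, at position length - s.length
lemma pvTailFrom_drop (marker : String) (t : List String) :
    ∀ s, pvTailFrom marker t = some s →
      s.length ≤ t.length ∧ t.drop (t.length - s.length) = s := by
  induction t with
  | nil => intro s h; simp [pvTailFrom] at h
  | cons l t ih =>
    intro s h
    simp only [pvTailFrom] at h
    cases ht : pvTailFrom marker t with
    | some s' =>
      rw [ht] at h
      obtain ⟨hle, hdrop⟩ := ih s' ht
      cases h
      refine ⟨by simpa using Nat.le_succ_of_le hle, ?_⟩
      have : l :: t = [l] ++ t := rfl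
      rw [List.length_cons, Nat.succ_sub hle, List.drop_succ_cons, hdrop]
    | none =>
      rw [ht] at h
      by_cases hm : PySem.Chars.isIn marker.toList l.toList
      · simp [hm] at h
        cases h
        simp
      · simp [hm] at h

-- B's fold over the enumeration, started at offset k with accumulator acc
lemma pvFoldIdx (marker : String) (t : List String) :
    ∀ (k : Int) (acc : Option Int),
    (PySem.List.enumerate t k).foldl
        (fun acc p => if PySem.Str.isIn marker p.2 then some p.1 else acc) acc =
      (match pvTailFrom marker t with
       | some s => some (k + t.length - s.length)
       | none => acc) := by
  induction t with
  | nil => intro k acc; simp [PySem.List.enumerate, pvTailFrom]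
  | cons l t ih =>
    intro k acc
    have hen : PySem.List.enumerate (l :: t) k = (k, l) :: PySem.List.enumerate t (k + 1) := by
      simp [PySem.List.enumerate]
    rw [hen, List.foldl_cons, ih]
    by_cases hm : PySem.Chars.isIn marker.toList l.toList
    · cases ht : pvTailFrom marker t with
      | some s =>
        have hle := (pvTailFrom_drop marker t s ht).1
        simp only [pvTailFrom, ht]
        simp only [List.length_cons]
        congr 1
        push_cast
        ring
      | none =>
        simp [pvTailFrom, ht, hm]
    · cases ht : pvTailFrom marker t with
      | some s =>
        simp only [pvTailFrom, ht]
        simp only [List.length_cons]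
        congr 1
        push_cast
        ring
      | none =>
        simp [pvTailFrom, ht, hm]

-- B equals the stripped last-marker suffix (or [])
lemma pvAltEq (marker : String) (lines : List String) :
    (match pvLastIdx marker lines with
     | none => ([] : List String)
     | some i => (PySem.List.slice lines (some i) none).map PySem.Str.strip) =
      (match pvTailFrom marker lines with
       | some s => s.map PySem.Str.strip
       | none => []) := by
  unfold pvLastIdx
  rw [pvFoldIdx marker lines 0 none]
  cases ht : pvTailFrom marker lines with
  | none => simp
  | some s =>
    obtain ⟨hle, hdrop⟩ := pvTailFrom_drop marker lines s ht
    have hcast : (0 : Int) + lines.length - s.length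
        = ((lines.length - s.length : Nat) : Int) := by
      push_cast [hle]; ring
    simp only [hcast]
    rw [PySem.List.slice_from_natCast, hdrop]

-- ===== VERDICT (by name: the statement is the Claim_ definition above) =====
theorem extract_latest_tm_block_spec : Claim_equal_extract_latest_tm_block := by
  intro log_lines tm_id _
  show extract_latest_tm_block log_lines tm_id = extract_latest_tm_block_alt log_lines tm_id
  unfold extract_latest_tm_block extract_latest_tm_block_alt
  rw [pvStartRun, ← pvAltEq]
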